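-- pv_equiv track=rewrite | github.com/ignajaja/coding-II | practica/composicion_numeros.py | divisibles
-- ===== SOURCE A (Python) =====
-- def divisibles(numero, divisor):
--     acumulador = 0
--     exponente = 0
--     while numero > 0:
--         if (numero % 10) % divisor == 0:
--             acumulador += (numero % 10) * (10**exponente)
--             exponente += 1
--         numero //= 10
--     return acumulador
-- ===== SOURCE B (Python) =====
-- def divisibles(numero, divisor):
--     digitos = []
--     while numero > 0:
--         digitos.append(numero % 10)
--         numero //= 10
--     resultado = 0
--     for d in reversed(digitos):
--         if d % divisor == 0:
--             resultado = resultado * 10 + d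
--     return resultado
-- ===== Notes on version B (the rewrite author's own statement) =====
-- stated objective: alternative
-- what changed: A composes kept digits LSB-first in one pass with a 10**exponente accumulator; B first extracts the digit list, then folds Horner-style (resultado*10+d) over the reversed list MSB-first.
import Mathlib
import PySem

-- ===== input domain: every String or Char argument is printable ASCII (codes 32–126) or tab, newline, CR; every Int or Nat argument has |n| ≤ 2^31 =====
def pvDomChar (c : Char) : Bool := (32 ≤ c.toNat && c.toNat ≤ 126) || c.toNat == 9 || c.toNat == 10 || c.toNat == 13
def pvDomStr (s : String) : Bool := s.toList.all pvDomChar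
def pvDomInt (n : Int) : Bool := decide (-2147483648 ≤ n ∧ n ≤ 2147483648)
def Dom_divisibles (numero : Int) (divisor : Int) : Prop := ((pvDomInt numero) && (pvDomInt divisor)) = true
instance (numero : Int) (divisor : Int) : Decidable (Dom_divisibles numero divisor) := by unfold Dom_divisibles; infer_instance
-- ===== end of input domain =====

-- B replaces A's single LSB-first pass with a 10**exponente accumulator by digit-list
-- extraction followed by an MSB-first Horner fold (alternative decomposition, same cost).

-- termination helper shared by both ports ('numero //= 10' strictly shrinks a positive numero)
theorem pv_div10_lt (n : Int) (h : 0 < n) : (PySem.Int.floordiv n 10).toNat < n.toNat := by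
  rw [PySem.Int.floordiv_eq_ediv_of_pos (by norm_num : (0:Int) < 10)]
  omega

-- ===== PORT A =====
def divisiblesLoop (numero acumulador exponente divisor : Int) : Int :=
  if h : 0 < numero then
    if PySem.Int.mod (PySem.Int.mod numero 10) divisor = 0 then
      divisiblesLoop (PySem.Int.floordiv numero 10)
        (acumulador + PySem.Int.mod numero 10 * 10 ^ exponente.toNat) (exponente + 1) divisor
    else
      divisiblesLoop (PySem.Int.floordiv numero 10) acumulador exponente divisor
  else acumulador
termination_by numero.toNat
decreasing_by all_goals exact pv_div10_lt numero h

def divisibles (numero : Int) (divisor : Int) : Int :=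
  divisiblesLoop numero 0 0 divisor

-- ===== PORT B =====
def digitosLoop (numero : Int) (digitos : List Int) : List Int :=
  if h : 0 < numero then
    digitosLoop (PySem.Int.floordiv numero 10) (digitos ++ [PySem.Int.mod numero 10])
  else digitos
termination_by numero.toNat
decreasing_by exact pv_div10_lt numero h

def divisibles_alt (numero : Int) (divisor : Int) : Int :=
  let digitos := digitosLoop numero []
  digitos.reverse.foldl
    (fun resultado d => if PySem.Int.mod d divisor = 0 then resultado * 10 + d else resultado) 0

-- ===== PRECONDITION & SPEC =====
-- Pre_ excludes exactly the inputs where Python A raises ZeroDivisionError: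
-- a positive numero with divisor = 0 (for numero ≤ 0 the loop never runs, so divisor may be 0).
def Pre_divisibles (numero : Int) (divisor : Int) : Prop := numero ≤ 0 ∨ divisor ≠ 0
instance (numero : Int) (divisor : Int) : Decidable (Pre_divisibles numero divisor) := by
  unfold Pre_divisibles; infer_instance

def pvWitness_divisibles : Int × Int := (3063, 3)

def Spec_divisibles (numero : Int) (divisor : Int) (out : Int) : Prop := out = divisibles_alt numero divisor
instance (numero : Int) (divisor : Int) (out : Int) : Decidable (Spec_divisibles numero divisor out) := by unfold Spec_divisibles; infer_instance

-- ===== CLAIM (what is proved, stated in full; the proofs are below) =====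
def Claim_equal_divisibles : Prop := ∀ (numero : Int) (divisor : Int), Dom_divisibles numero divisor → Pre_divisibles numero divisor → Spec_divisibles numero divisor (divisibles numero divisor)

-- ===== LEMMAS AND PROOFS =====

-- value of an LSB-first digit list
def pvVal (K : List Int) : Int := K.foldr (fun d v => d + 10 * v) 0

theorem pvVal_nil : pvVal [] = 0 := rfl
theorem pvVal_cons (d : Int) (t : List Int) : pvVal (d :: t) = d + 10 * pvVal t := rfl

theorem digitosLoop_stop (n : Int) (acc : List Int) (h : ¬ 0 < n) :
    digitosLoop n acc = acc := by
  rw [digitosLoop]; simp [h]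

theorem digitosLoop_step (n : Int) (acc : List Int) (h : 0 < n) :
    digitosLoop n acc = digitosLoop (PySem.Int.floordiv n 10) (acc ++ [PySem.Int.mod n 10]) := by
  rw [digitosLoop]; simp [h]

theorem divisiblesLoop_stop (n a e divisor : Int) (h : ¬ 0 < n) :
    divisiblesLoop n a e divisor = a := by
  rw [divisiblesLoop]; simp [h]

theorem divisiblesLoop_step (n a e divisor : Int) (h : 0 < n) :
    divisiblesLoop n a e divisor =
      if PySem.Int.mod (PySem.Int.mod n 10) divisor = 0 then
        divisiblesLoop (PySem.Int.floordiv n 10) (a + PySem.Int.mod n 10 * 10 ^ e.toNat) (e + 1) divisor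
      else divisiblesLoop (PySem.Int.floordiv n 10) a e divisor := by
  rw [divisiblesLoop]; simp [h]

theorem digitosLoop_acc (m : Nat) : ∀ (n : Int), n.toNat ≤ m → ∀ (acc : List Int),
    digitosLoop n acc = acc ++ digitosLoop n [] := by
  induction m with
  | zero =>
    intro n hm acc
    have h0 : ¬ 0 < n := by omega
    rw [digitosLoop_stop n acc h0, digitosLoop_stop n [] h0]
    simp
  | succ m ih =>
    intro n hm acc
    by_cases h0 : 0 < n
    · have hlt : (PySem.Int.floordiv n 10).toNat ≤ m := by
        have := pv_div10_lt n h0; omega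
      rw [digitosLoop_step n acc h0, digitosLoop_step n [] h0,
        ih _ hlt (acc ++ [PySem.Int.mod n 10]), ih _ hlt ([] ++ [PySem.Int.mod n 10])]
      simp
    · rw [digitosLoop_stop n acc h0, digitosLoop_stop n [] h0]
      simp

theorem digitosLoop_unfold (n : Int) (h : 0 < n) :
    digitosLoop n [] = PySem.Int.mod n 10 :: digitosLoop (PySem.Int.floordiv n 10) [] := by
  rw [digitosLoop_step n [] h,
    digitosLoop_acc (PySem.Int.floordiv n 10).toNat _ le_rfl]
  simp

theorem loopA_eq (divisor : Int) (m : Nat) : ∀ (n : Int), n.toNat ≤ m →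
    ∀ (acc e : Int), 0 ≤ e →
    divisiblesLoop n acc e divisor =
      acc + pvVal ((digitosLoop n []).filter
        (fun d => decide (PySem.Int.mod d divisor = 0))) * 10 ^ e.toNat := by
  induction m with
  | zero =>
    intro n hm acc e he
    have h0 : ¬ 0 < n := by omega
    rw [divisiblesLoop_stop n acc e divisor h0, digitosLoop_stop n [] h0]
    simp [pvVal_nil]
  | succ m ih =>
    intro n hm acc e he
    by_cases h0 : 0 < n
    · have hlt : (PySem.Int.floordiv n 10).toNat ≤ m := by
        have := pv_div10_lt n h0; omega
      rw [divisiblesLoop_step n acc e divisor h0, digitosLoop_unfold n h0]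
      by_cases hp : PySem.Int.mod (PySem.Int.mod n 10) divisor = 0
      · rw [if_pos hp, ih _ hlt _ (e + 1) (by omega)]
        have ht : (e + 1).toNat = e.toNat + 1 := by omega
        simp only [List.filter_cons, hp, decide_true, if_true, pvVal_cons, ht]
        ring
      · rw [if_neg hp, ih _ hlt acc e he]
        simp only [List.filter_cons, hp, decide_false, if_false, Bool.false_eq_true]
    · rw [divisiblesLoop_stop n acc e divisor h0, digitosLoop_stop n [] h0]
      simp [pvVal_nil]

theorem horner_rev (K : List Int) : ∀ (r : Int),
    K.reverse.foldl (fun res d => res * 10 + d) r = r * 10 ^ K.length + pvVal K := by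
  induction K with
  | nil => intro r; simp [pvVal_nil]
  | cons d t ih =>
    intro r
    simp only [List.reverse_cons, List.foldl_append, List.foldl_cons, List.foldl_nil, ih,
      pvVal_cons, List.length_cons]
    ring

theorem alt_eq (numero divisor : Int) :
    divisibles_alt numero divisor =
      pvVal ((digitosLoop numero []).filter
        (fun d => decide (PySem.Int.mod d divisor = 0))) := by
  unfold divisibles_alt
  rw [PySem.List.foldl_ite_eq_foldl_filter (p := fun d => PySem.Int.mod d divisor = 0)
    (f := fun res d => res * 10 + d)]
  rw [List.filter_reverse, horner_rev]
  simp

-- ===== VERDICT (by name: the statement is the Claim_ definition above) =====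
theorem divisibles_spec : Claim_equal_divisibles := by
  intro numero divisor _ _
  unfold Spec_divisibles divisibles
  rw [loopA_eq divisor numero.toNat numero le_rfl 0 0 le_rfl, alt_eq]
  simp
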